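-- pv_equiv track=rewrite | github.com/ba-NaN-NaN-NaN-NaN-NaN-NaN-NaN-NaN-NaNa/adventurs | speedrun/2021d23.py | minimum_cost_to_fix
-- ===== SOURCE A (Python) =====
-- WANTED_COLUMN = {
--     "A":2,
--     "B":4,
--     "C":6,
--     "D":8,
-- }
--
-- COST_PER_MOVE = {
--     "A":1,
--     "B":10,
--     "C":100,
--     "D":1000,
-- }
--
-- def minimum_cost_to_fix(row_nr, col_nr, content):
--     """
--     LOWER boundary of how much this will cost to fix. Ignore if anything needs to move out of the way etc.
--     """
--     if content in ["#", "."]: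
--         return 0
--
--     wanted_col = WANTED_COLUMN[content]
--
--     if row_nr == 0:
--         cols_to_move = abs(wanted_col-col_nr)
--         """
--         if cols_to_move == 0:
--             # We need to go down.
--             return COST_PER_MOVE[content]
--         else:
--
--         """
--         return COST_PER_MOVE[content] * (1+cols_to_move)
--     else:
--         if wanted_col == col_nr:
--             return 0
--         return COST_PER_MOVE[content] + minimum_cost_to_fix(row_nr-1, col_nr, content)
-- ===== SOURCE B (Python) =====
-- WANTED_COLUMN = {"A": 2, "B": 4, "C": 6, "D": 8}
-- COST_PER_MOVE = {"A": 1, "B": 10, "C": 100, "D": 1000}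
--
-- def minimum_cost_to_fix(row_nr, col_nr, content):
--     if content in ("#", "."):
--         return 0
--     cols = abs(WANTED_COLUMN[content] - col_nr)
--     if row_nr == 0:
--         return COST_PER_MOVE[content] * (1 + cols)
--     if cols == 0:
--         return 0
--     return COST_PER_MOVE[content] * (row_nr + 1 + cols)
-- ===== Notes on version B (the rewrite author's own statement) =====
-- stated objective: simpler
-- what changed: Replaces the recursive per-row accumulation with a direct closed-form arithmetic expression (cost * (row_nr + 1 + cols)).
import Mathlib
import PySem

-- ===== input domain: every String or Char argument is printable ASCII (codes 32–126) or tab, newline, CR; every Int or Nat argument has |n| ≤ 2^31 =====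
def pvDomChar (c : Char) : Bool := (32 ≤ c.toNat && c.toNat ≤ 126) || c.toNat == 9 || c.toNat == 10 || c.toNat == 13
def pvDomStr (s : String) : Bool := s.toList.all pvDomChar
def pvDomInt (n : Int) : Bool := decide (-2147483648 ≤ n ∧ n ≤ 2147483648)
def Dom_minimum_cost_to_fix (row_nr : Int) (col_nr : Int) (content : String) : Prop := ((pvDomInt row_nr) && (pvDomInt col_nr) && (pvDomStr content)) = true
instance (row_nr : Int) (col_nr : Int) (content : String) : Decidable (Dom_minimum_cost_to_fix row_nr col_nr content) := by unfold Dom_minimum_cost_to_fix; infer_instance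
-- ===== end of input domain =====

-- B replaces A's per-row recursion with a closed-form arithmetic expression (objective: simpler).

-- ===== PORT A =====
-- WANTED_COLUMN[content] / COST_PER_MOVE[content]; for content outside the dict Python
-- raises KeyError, so such inputs are excluded by Pre_ and the junk value 0 is never relied on.
def wantedColumn (content : String) : Int :=
  if content = "A" then 2 else if content = "B" then 4
  else if content = "C" then 6 else if content = "D" then 8 else 0

def costPerMove (content : String) : Int :=
  if content = "A" then 1 else if content = "B" then 10
  else if content = "C" then 100 else if content = "D" then 1000 else 0

-- the recursive body of A; fuel = row_nr.toNat suffices on Pre_ (on diverging inputs,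
-- row_nr < 0 with a misaligned amphipod, A never returns and Pre_ excludes them)
def mcfGo (fuel : Nat) (row_nr : Int) (col_nr : Int) (content : String) : Int :=
  if row_nr = 0 then
    costPerMove content * (1 + |wantedColumn content - col_nr|)
  else if wantedColumn content = col_nr then 0
  else
    match fuel with
    | 0 => 0
    | n + 1 => costPerMove content + mcfGo n (row_nr - 1) col_nr content

def minimum_cost_to_fix (row_nr : Int) (col_nr : Int) (content : String) : Int :=
  if content = "#" ∨ content = "." then 0
  else mcfGo row_nr.toNat row_nr col_nr content

-- ===== PORT B =====
def minimum_cost_to_fix_alt (row_nr : Int) (col_nr : Int) (content : String) : Int :=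
  if content = "#" ∨ content = "." then 0
  else
    let cols := |wantedColumn content - col_nr|
    if row_nr = 0 then costPerMove content * (1 + cols)
    else if cols = 0 then 0
    else costPerMove content * (row_nr + 1 + cols)

-- ===== PRECONDITION & SPEC =====
-- Pre_ excludes exactly the inputs on which A raises: content outside both dicts (KeyError)
-- and a misaligned amphipod at negative row_nr (unbounded recursion / RecursionError).
def Pre_minimum_cost_to_fix (row_nr : Int) (col_nr : Int) (content : String) : Prop :=
  content = "#" ∨ content = "." ∨
  ((content = "A" ∨ content = "B" ∨ content = "C" ∨ content = "D") ∧
    (0 ≤ row_nr ∨ wantedColumn content = col_nr))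
instance (row_nr : Int) (col_nr : Int) (content : String) : Decidable (Pre_minimum_cost_to_fix row_nr col_nr content) := by unfold Pre_minimum_cost_to_fix; infer_instance

def pvWitness_minimum_cost_to_fix : Int × Int × String := (1, 3, "B")

def Spec_minimum_cost_to_fix (row_nr : Int) (col_nr : Int) (content : String) (out : Int) : Prop := out = minimum_cost_to_fix_alt row_nr col_nr content
instance (row_nr : Int) (col_nr : Int) (content : String) (out : Int) : Decidable (Spec_minimum_cost_to_fix row_nr col_nr content out) := by unfold Spec_minimum_cost_to_fix; infer_instance

-- ===== CLAIM (what is proved, stated in full; the proofs are below) =====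
def Claim_equal_minimum_cost_to_fix : Prop := ∀ (row_nr : Int) (col_nr : Int) (content : String), Dom_minimum_cost_to_fix row_nr col_nr content → Pre_minimum_cost_to_fix row_nr col_nr content → Spec_minimum_cost_to_fix row_nr col_nr content (minimum_cost_to_fix row_nr col_nr content)

-- ===== LEMMAS AND PROOFS =====

-- with exactly row_nr = n fuel, A's recursion computes B's closed form
theorem mcfGo_closed (n : Nat) (col_nr : Int) (content : String) :
    mcfGo n (n : Int) col_nr content =
      (if (n : Int) = 0 then costPerMove content * (1 + |wantedColumn content - col_nr|)
       else if |wantedColumn content - col_nr| = 0 then 0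
       else costPerMove content * ((n : Int) + 1 + |wantedColumn content - col_nr|)) := by
  induction n with
  | zero => simp [mcfGo]
  | succ n ih =>
    have hne : ((n + 1 : Nat) : Int) ≠ 0 := by omega
    by_cases hw : wantedColumn content = col_nr
    · simp [mcfGo, hw]
    · have hcols : |wantedColumn content - col_nr| ≠ 0 := by
        intro h; exact hw (by have := abs_eq_zero.mp h; omega)
      have hstep : ((n + 1 : Nat) : Int) - 1 = (n : Int) := by push_cast; ring
      rw [mcfGo]
      rw [if_neg hne, if_neg hw, hstep, ih]
      rw [if_neg hne, if_neg hcols]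
      by_cases hn : n = 0 <;> simp [hn, hcols] <;> push_cast <;> ring

-- ===== VERDICT (by name: the statement is the Claim_ definition above) =====
theorem minimum_cost_to_fix_spec : Claim_equal_minimum_cost_to_fix := by
  intro row_nr col_nr content _ hpre
  unfold Spec_minimum_cost_to_fix minimum_cost_to_fix minimum_cost_to_fix_alt
  by_cases hhash : content = "#" ∨ content = "."
  · simp [hhash]
  · simp only [hhash, if_false]
    rcases hpre with h | h | ⟨_, hrest⟩
    · exact absurd (Or.inl h) hhash
    · exact absurd (Or.inr h) hhash
    rcases hrest with hrow | hw
    · have hcast : ((row_nr.toNat : Nat) : Int) = row_nr := Int.toNat_of_nonneg hrow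
      have hgo := mcfGo_closed row_nr.toNat col_nr content
      rw [hcast] at hgo
      rw [hgo]
    · -- aligned: wantedColumn = col_nr, any row_nr (incl. negative, where A returns 0 at once)
      have hc : |wantedColumn content - col_nr| = 0 := by rw [hw]; simp
      by_cases h0 : row_nr = 0
      · simp [h0, hw, hc, mcfGo]
      · cases hft : row_nr.toNat with
        | zero => simp [mcfGo, h0, hw]
        | succ m => simp [mcfGo, h0, hw]
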